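-- pv_equiv track=rewrite | github.com/khoaguye/chess_tool | convert_template.py | describe_board
-- ===== SOURCE A (Python) =====
-- PIECE_NAMES = {
--     'r': 'rook',
--     'n': 'knight',
--     'b': 'bishop',
--     'q': 'queen',
--     'k': 'king',
--     'p': 'pawn',
-- }
--
-- def describe_board(fen_components):
--     output = ""
--
--     # Split the FEN string into ranks
--     ranks = fen_components[0].split('/')
--
--     # Loop through each rank
--     for row, rank in enumerate(ranks):
--         col = 0
--         row_string = ""
--
--         # skip if empty rank
--         if rank == "8":
--             continue
--
--         # Loop through each character in the rank
--         for piece_char in rank: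
--             if piece_char.isdigit():
--                 col += int(piece_char)  # If it's a number, move the column by that number
--             else:
--                 color = "white" if piece_char.isupper() else "black"
--                 piece_name = PIECE_NAMES[piece_char.lower()]  # Get the piece name
--                 row_string += f"{color} {piece_name} at {chr(col + ord('a'))}{8 - row}, "
--                 col += 1  # Move to the next column
--         output += " and ".join(row_string.rstrip(", ").rsplit(", ", 1)).capitalize() + ". "
--     return output
-- ===== SOURCE B (Python) =====
-- PIECE_NAMES = {
--     'r': 'rook',
--     'n': 'knight',
--     'b': 'bishop',
--     'q': 'queen',
--     'k': 'king',
--     'p': 'pawn',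
-- }
--
-- def describe_board(fen_components):
--     out = []
--     for row, rank in enumerate(fen_components[0].split('/')):
--         if rank == "8":
--             continue
--         # stage 1: materialize the rank as explicit squares ('.' marks an empty square)
--         expanded = "".join("." * int(ch) if ch.isdigit() else ch for ch in rank)
--         # stage 2: a square's file is simply its index in the expanded rank
--         pieces = [
--             ("white" if ch.isupper() else "black")
--             + " " + PIECE_NAMES[ch.lower()]
--             + " at " + chr(col + ord('a')) + str(8 - row)
--             for col, ch in enumerate(expanded) if ch != "."
--         ]
--         if not pieces:
--             body = ""
--         elif len(pieces) == 1:
--             body = pieces[0]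
--         else:
--             body = ", ".join(pieces[:-1]) + " and " + pieces[-1]
--         out.append(body.capitalize() + ". ")
--     return "".join(out)
-- ===== Notes on version B (the rewrite author's own statement) =====
-- stated objective: alternative
-- what changed: B first expands each rank's digits into an explicit 64-square-style rank string with '.' for empty squares, then reads each piece's file directly as its index via enumerate over that expanded rank (no running column counter), and formats the sentence by explicit empty/single/comma-join-plus-'and' list joining instead of A's rstrip/rsplit trick on an accumulated string.
import Mathlib
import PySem

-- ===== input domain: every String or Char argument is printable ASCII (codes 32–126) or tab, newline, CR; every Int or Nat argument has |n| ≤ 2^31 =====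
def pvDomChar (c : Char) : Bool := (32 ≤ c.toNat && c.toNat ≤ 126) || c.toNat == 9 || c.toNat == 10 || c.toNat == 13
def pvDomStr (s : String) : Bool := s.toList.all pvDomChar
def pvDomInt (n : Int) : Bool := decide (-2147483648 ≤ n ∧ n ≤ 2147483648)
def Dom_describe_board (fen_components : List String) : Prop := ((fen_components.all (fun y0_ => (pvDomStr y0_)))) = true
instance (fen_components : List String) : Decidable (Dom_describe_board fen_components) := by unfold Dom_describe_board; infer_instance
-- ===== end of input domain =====

-- B expands each rank into an explicit square string ('.' = empty) and reads a piece's file as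
-- its index in that string (no running column counter), then joins the piece list explicitly
-- instead of A's rstrip/rsplit sentence trick (alternative decomposition; no speed claim).

-- Helpers shared by both Pythons (module constant PIECE_NAMES, the piece phrase, .capitalize()).

-- PIECE_NAMES[c] ; [] stands for KeyError (excluded by Pre_)
def pvPieceName (c : Char) : List Char :=
  if c = 'r' then ['r','o','o','k']
  else if c = 'n' then ['k','n','i','g','h','t']
  else if c = 'b' then ['b','i','s','h','o','p']
  else if c = 'q' then ['q','u','e','e','n']
  else if c = 'k' then ['k','i','n','g']
  else if c = 'p' then ['p','a','w','n']
  else []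

-- one char of str.lower(): exact for code points < 256 (ASCII and Latin-1)
def pvLow1 (c : Char) : Char :=
  if 65 ≤ c.toNat ∧ c.toNat ≤ 90 then Char.ofNat (c.toNat + 32)
  else if 192 ≤ c.toNat ∧ c.toNat ≤ 222 ∧ c.toNat ≠ 215 then Char.ofNat (c.toNat + 32)
  else c

-- first char of str.capitalize() (title-case): exact for code points < 256 except expanders
def pvUp1 (c : Char) : Char :=
  if 97 ≤ c.toNat ∧ c.toNat ≤ 122 then Char.ofNat (c.toNat - 32)
  else if 224 ≤ c.toNat ∧ c.toNat ≤ 254 ∧ c.toNat ≠ 247 then Char.ofNat (c.toNat - 32)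
  else c

-- str.capitalize(): first char title-cased, rest lowered (exact on the code points above)
def pvCapitalize : List Char → List Char
  | [] => []
  | c :: t => pvUp1 c :: t.map pvLow1

-- the piece phrase "{color} {piece_name} at {file}{8 - row}" (built identically in A and B)
def pvEntry (row : Int) (col : Nat) (c : Char) : List Char :=
  (if PySem.Chars.isupper c then ['w','h','i','t','e'] else ['b','l','a','c','k'])
    ++ [' '] ++ pvPieceName (PySem.Chars.lowerChar c)
    ++ [' ','a','t',' '] ++ [Char.ofNat (col + 97)] ++ PySem.Int.toChars (8 - row)

-- ===== PORT A =====

-- inner `for piece_char in rank` loop of A, state (col, row_string)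
def pvRowA (row : Int) : List Char → Nat → List Char → List Char
  | [], _, acc => acc
  | c :: rest, col, acc =>
    if PySem.Chars.isdigit c then pvRowA row rest (col + (c.toNat - 48)) acc
    else pvRowA row rest (col + 1) (acc ++ pvEntry row col c ++ [',', ' '])

-- s.rstrip(", "): drop trailing ',' / ' ' characters (exact)
def pvRstripCS (cs : List Char) : List Char :=
  (cs.reverse.dropWhile (fun c => c = ',' || c = ' ')).reverse

-- first occurrence split on sep (used on reversed input to get the LAST occurrence)
def pvFirstSplit (sep : List Char) : List Char → Option (List Char × List Char)
  | [] => none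
  | c :: rest =>
    if sep.isPrefixOf (c :: rest) then some ([], (c :: rest).drop sep.length)
    else (pvFirstSplit sep rest).map (fun p => (c :: p.1, p.2))

-- s.rsplit(sep, 1) for nonempty sep: exact
def pvRsplit1 (cs sep : List Char) : List (List Char) :=
  match pvFirstSplit sep.reverse cs.reverse with
  | none => [cs]
  | some (a, b) => [b.reverse, a.reverse]

-- one iteration of A's outer loop body (after the `rank == "8"` guard)
def pvSentA (row : Int) (rank : List Char) : List Char :=
  pvCapitalize (PySem.Chars.join [' ','a','n','d',' ']
      (pvRsplit1 (pvRstripCS (pvRowA row rank 0 [])) [',',' '])) ++ ['.', ' ']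

def describe_board (fen_components : List String) : String :=
  match PySem.List.pyGet? fen_components 0 with
  | none => ""   -- IndexError in Python; excluded by Pre_
  | some fen0 =>
    String.mk ((PySem.List.enumerate (PySem.Chars.splitOn fen0.toList ['/'])).foldl
      (fun out p => if p.2 = ['8'] then out else out ++ pvSentA p.1 p.2) [])

-- ===== PORT B =====

-- B stage 1: "." * int(ch) if ch.isdigit() else ch, joined over the rank
def pvExpand : List Char → List Char
  | [] => []
  | c :: rest =>
    (if PySem.Chars.isdigit c then List.replicate (c.toNat - 48) '.' else [c]) ++ pvExpand rest

-- B stage 2: the list comprehension over enumerate(expanded) with filter ch != "."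
def pvPieces (row : Int) (rank : List Char) : List (List Char) :=
  ((PySem.List.enumerate (pvExpand rank)).filter (fun p => p.2 ≠ '.')).map
    (fun p => pvEntry row p.1.toNat p.2)

-- B's sentence formatting: empty / single / ", ".join(all-but-last) + " and " + last
def pvFmtB : List (List Char) → List Char
  | [] => []
  | [e] => e
  | es => PySem.Chars.join [',',' '] es.dropLast ++ [' ','a','n','d',' '] ++ es.getLastD []

def pvSentB (row : Int) (rank : List Char) : List Char :=
  pvCapitalize (pvFmtB (pvPieces row rank)) ++ ['.', ' ']

def describe_board_alt (fen_components : List String) : String :=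
  match PySem.List.pyGet? fen_components 0 with
  | none => ""   -- IndexError in Python; excluded by Pre_
  | some fen0 =>
    String.mk (PySem.Chars.join []
      ((PySem.List.enumerate (PySem.Chars.splitOn fen0.toList ['/'])).foldl
        (fun parts p => if p.2 = ['8'] then parts else parts ++ [pvSentB p.1 p.2]) []))

-- ===== PRECONDITION & SPEC =====
-- Pre_ excludes exactly the inputs on which A raises: an empty list (IndexError on
-- fen_components[0]) and first components containing a character that is not '/', a digit or a
-- chess-piece letter (KeyError in PIECE_NAMES[piece_char.lower()]).
def Pre_describe_board (fen_components : List String) : Prop :=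
  fen_components ≠ [] ∧
  ((fen_components.headD "").toList.all (fun c =>
    c == '/' || PySem.Chars.isdigit c
      || ['r','n','b','q','k','p'].contains (PySem.Chars.lowerChar c))) = true
instance (fen_components : List String) : Decidable (Pre_describe_board fen_components) := by
  unfold Pre_describe_board; infer_instance

def pvWitness_describe_board : List String := ["k3/2Q1"]

def Spec_describe_board (fen_components : List String) (out : String) : Prop := out = describe_board_alt fen_components
instance (fen_components : List String) (out : String) : Decidable (Spec_describe_board fen_components out) := by unfold Spec_describe_board; infer_instance

-- ===== CLAIM (what is proved, stated in full; the proofs are below) =====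
def Claim_equal_describe_board : Prop := ∀ (fen_components : List String), Dom_describe_board fen_components → Pre_describe_board fen_components → Spec_describe_board fen_components (describe_board fen_components)

-- ===== LEMMAS AND PROOFS =====

-- every character of every part produced by splitOn occurs in the split string
theorem pvSplitOn_go_mem (sep : List Char) :
    ∀ (fuel : Nat) (l cur : List Char) (acc : List (List Char))
      (part : List Char) (c : Char),
      part ∈ PySem.Chars.splitOn.go sep fuel l cur acc → c ∈ part →
      c ∈ l ∨ c ∈ cur ∨ ∃ p ∈ acc, c ∈ p := by
  intro fuel
  induction fuel with
  | zero =>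
    intro l cur acc part c hp hc
    rw [show PySem.Chars.splitOn.go sep 0 l cur acc = ((cur.reverse ++ l) :: acc).reverse
        from rfl] at hp
    rw [List.mem_reverse, List.mem_cons] at hp
    rcases hp with rfl | hp
    · rcases List.mem_append.mp hc with h | h
      · right; left; exact List.mem_reverse.mp h
      · left; exact h
    · right; right; exact ⟨part, hp, hc⟩
  | succ fuel ih =>
    intro l cur acc part c hp hc
    cases l with
    | nil =>
      rw [show PySem.Chars.splitOn.go sep (fuel + 1) [] cur acc = (cur.reverse :: acc).reverse
          from rfl] at hp
      rw [List.mem_reverse, List.mem_cons] at hp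
      rcases hp with rfl | hp
      · right; left; exact List.mem_reverse.mp hc
      · right; right; exact ⟨part, hp, hc⟩
    | cons d rest =>
      rw [show PySem.Chars.splitOn.go sep (fuel + 1) (d :: rest) cur acc
          = (if sep.isPrefixOf (d :: rest) = true
             then PySem.Chars.splitOn.go sep fuel (List.drop sep.length (d :: rest)) []
               (cur.reverse :: acc)
             else PySem.Chars.splitOn.go sep fuel rest (d :: cur) acc) from rfl] at hp
      by_cases hpre : sep.isPrefixOf (d :: rest) = true
      · rw [if_pos hpre] at hp
        rcases ih _ _ _ _ c hp hc with h | h | ⟨p, hpm, hcp⟩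
        · left; exact List.mem_of_mem_drop h
        · simp at h
        · rw [List.mem_cons] at hpm
          rcases hpm with rfl | hpm
          · right; left; exact List.mem_reverse.mp hcp
          · right; right; exact ⟨p, hpm, hcp⟩
      · rw [if_neg hpre] at hp
        rcases ih _ _ _ _ c hp hc with h | h | h
        · left; exact List.mem_cons_of_mem _ h
        · rw [List.mem_cons] at h
          rcases h with rfl | h
          · left; exact List.mem_cons_self
          · right; left; exact h
        · right; right; exact h

theorem pvSplitOn_mem (s sep part : List Char) (c : Char)
    (hp : part ∈ PySem.Chars.splitOn s sep) (hc : c ∈ part) : c ∈ s := by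
  unfold PySem.Chars.splitOn at hp
  rcases pvSplitOn_go_mem sep _ _ _ _ _ c hp hc with h | h | ⟨p, hpm, _⟩
  · exact h
  · simp at h
  · simp at hpm

-- flattening of B's entry list into A's comma-terminated row string
def pvFlat (es : List (List Char)) : List Char := (es.map (· ++ [',', ' '])).flatten

theorem pvFlat_cons (e : List Char) (es : List (List Char)) :
    pvFlat (e :: es) = e ++ [',', ' '] ++ pvFlat es := by
  simp [pvFlat]

theorem pvFlat_append (es : List (List Char)) (e : List Char) :
    pvFlat (es ++ [e]) = pvFlat es ++ e ++ [',', ' '] := by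
  simp [pvFlat]

-- enumerate of a replicate of '.' is entirely filtered away
theorem pvFilter_replicate (d : Nat) : ∀ (s : Int),
    (PySem.List.enumerate (List.replicate d '.') s).filter (fun p => p.2 ≠ '.') = [] := by
  induction d with
  | zero => intro s; simp [PySem.List.enumerate_nil]
  | succ d ih =>
    intro s
    rw [List.replicate_succ, PySem.List.enumerate_cons, List.filter_cons]
    simpa using ih (s + 1)

-- A's scanning loop produces exactly the flattening of B's enumerate/filter/map pieces
theorem pvRowA_eq_flat (row : Int) (rank : List Char) (hch : '.' ∉ rank) :
    ∀ (col : Nat) (acc : List Char),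
      pvRowA row rank col acc
        = acc ++ pvFlat (((PySem.List.enumerate (pvExpand rank) (col : Int)).filter
            (fun p => p.2 ≠ '.')).map (fun p => pvEntry row p.1.toNat p.2)) := by
  induction rank with
  | nil => intro col acc; simp [pvRowA, pvExpand, PySem.List.enumerate_nil, pvFlat]
  | cons c rest ih =>
    have hrest : '.' ∉ rest := fun h => hch (List.mem_cons_of_mem _ h)
    have hc : c ≠ '.' := fun h => hch (h ▸ List.mem_cons_self)
    intro col acc
    have hexp : pvExpand (c :: rest)
        = (if PySem.Chars.isdigit c then List.replicate (c.toNat - 48) '.' else [c])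
          ++ pvExpand rest := rfl
    by_cases hd : PySem.Chars.isdigit c = true
    · rw [show pvRowA row (c :: rest) col acc
          = pvRowA row rest (col + (c.toNat - 48)) acc from by simp [pvRowA, hd],
        ih hrest]
      rw [hexp, if_pos hd, PySem.List.enumerate_append, List.filter_append, pvFilter_replicate,
        List.nil_append, List.length_replicate]
      push_cast
      ring_nf
    · rw [show pvRowA row (c :: rest) col acc
          = pvRowA row rest (col + 1) (acc ++ pvEntry row col c ++ [',', ' ']) from by
            simp [pvRowA, hd],
        ih hrest]
      have hcd : (decide (((col : Int), c).2 ≠ '.')) = true := by simp [hc]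
      rw [hexp, if_neg hd, List.singleton_append, PySem.List.enumerate_cons, List.filter_cons,
        if_pos hcd, List.map_cons, pvFlat_cons,
        show (((col : Int), c).1.toNat) = col from Int.toNat_natCast col,
        show ((col : Int) + 1) = ((col + 1 : Nat) : Int) from by push_cast; ring]
      simp

-- an entry: nonempty, comma-free, and its last character is neither ',' nor ' '
def pvEntryOK (e : List Char) : Prop :=
  e ≠ [] ∧ (∀ c ∈ e, c ≠ ',') ∧ (∀ x, e.getLast? = some x → x ≠ ' ' ∧ x ≠ ',')

-- characters of str(8 - row): digits, possibly a leading '-'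
theorem pvDigitChar_mem (n : Nat) (h : n < 10) : '0' ≤ Nat.digitChar n ∧ Nat.digitChar n ≤ '9' := by
  interval_cases n <;> decide

theorem pvToDigitsCore_all (f n : Nat) : ∀ (ds : List Char),
    (∀ c ∈ ds, '0' ≤ c ∧ c ≤ '9') → ∀ c ∈ Nat.toDigitsCore 10 f n ds, '0' ≤ c ∧ c ≤ '9' := by
  induction f generalizing n with
  | zero => intro ds h; simpa [Nat.toDigitsCore] using h
  | succ f ih =>
    intro ds h c hc
    rw [Nat.toDigitsCore] at hc
    by_cases h10 : n / 10 = 0 <;> simp [h10] at hc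
    · rcases hc with h1 | h1
      · subst h1; exact pvDigitChar_mem _ (Nat.mod_lt _ (by norm_num))
      · exact h _ h1
    · refine ih _ _ (fun c' hc' => ?_) _ hc
      rcases List.mem_cons.mp hc' with h1 | h1
      · subst h1; exact pvDigitChar_mem _ (Nat.mod_lt _ (by norm_num))
      · exact h _ h1

theorem pvToDigitsCore_len (f n : Nat) : ∀ (ds : List Char),
    ds.length ≤ (Nat.toDigitsCore 10 f n ds).length := by
  induction f generalizing n with
  | zero => intro ds; simp [Nat.toDigitsCore]
  | succ f ih =>
    intro ds
    rw [Nat.toDigitsCore]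
    by_cases h10 : n / 10 = 0 <;> simp [h10]
    · calc ds.length ≤ (Nat.digitChar (n % 10) :: ds).length := by simp
        _ ≤ _ := ih _ _

theorem pvToChars_ne_nil (n : Int) : PySem.Int.toChars n ≠ [] := by
  have h : ∀ m : Nat, Nat.toDigits 10 m ≠ [] := by
    intro m
    rw [Nat.toDigits, Nat.toDigitsCore]
    by_cases h10 : m / 10 = 0 <;> simp [h10]
    intro he
    have := pvToDigitsCore_len m (m / 10) (Nat.digitChar (m % 10) :: [])
    rw [he] at this; simp at this
  unfold PySem.Int.toChars
  split <;> simp [h]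

theorem pvToChars_all (n : Int) :
    ∀ c ∈ PySem.Int.toChars n, ('0' ≤ c ∧ c ≤ '9') ∨ c = '-' := by
  unfold PySem.Int.toChars
  have h : ∀ m : Nat, ∀ c ∈ Nat.toDigits 10 m, '0' ≤ c ∧ c ≤ '9' := by
    intro m; exact pvToDigitsCore_all _ _ _ (by simp)
  split
  · intro c hc
    rcases List.mem_cons.mp hc with h1 | h1
    · right; exact h1
    · left; exact h _ _ h1
  · intro c hc; left; exact h _ _ hc

theorem pvOfNat_ne (n : Nat) (h : 97 ≤ n) : Char.ofNat n ≠ ',' ∧ Char.ofNat n ≠ ' ' := by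
  constructor <;>
    (intro he; have h2 := congrArg Char.toNat he; rw [Char.toNat_ofNat] at h2;
     revert h2; split)
  · rw [show Char.toNat ',' = 44 from rfl]; omega
  · rw [show Char.toNat ',' = 44 from rfl]; omega
  · rw [show Char.toNat ' ' = 32 from rfl]; omega
  · rw [show Char.toNat ' ' = 32 from rfl]; omega

theorem pvPieceName_no_comma (c : Char) : ∀ x ∈ pvPieceName c, x ≠ ',' := by
  unfold pvPieceName
  split_ifs <;> (intro x hx; fin_cases hx <;> decide)

theorem pvEntry_ok (row : Int) (col : Nat) (c : Char) : pvEntryOK (pvEntry row col c) := by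
  refine ⟨?_, ?_, ?_⟩
  · unfold pvEntry
    exact List.append_ne_nil_of_right_ne_nil _ (pvToChars_ne_nil _)
  · intro x hx he
    subst he
    unfold pvEntry at hx
    simp only [List.mem_append] at hx
    rcases hx with ((((h1 | h1) | h1) | h1) | h1) | h1
    · revert h1; split <;> decide
    · exact absurd h1 (by decide)
    · exact pvPieceName_no_comma _ _ h1 rfl
    · exact absurd h1 (by decide)
    · exact absurd h1 (by
        intro hm
        rw [List.mem_singleton] at hm
        exact (pvOfNat_ne _ (by omega)).1 hm.symm)
    · rcases pvToChars_all _ _ h1 with ⟨hl, hr⟩ | hh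
      · revert hl hr; decide
      · revert hh; decide
  · intro x hx
    unfold pvEntry at hx
    rw [List.getLast?_append_of_ne_nil _ (pvToChars_ne_nil _)] at hx
    have hm : x ∈ PySem.Int.toChars (8 - row) := List.mem_of_getLast? hx
    rcases pvToChars_all _ _ hm with ⟨hl, hr⟩ | hh
    · constructor <;> (intro he; subst he; revert hl hr; decide)
    · subst hh; constructor <;> decide

theorem pvPieces_ok (row : Int) (rank : List Char) :
    ∀ e ∈ pvPieces row rank, pvEntryOK e := by
  intro e he
  rcases List.mem_map.mp he with ⟨p, _, rfl⟩
  exact pvEntry_ok _ _ _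

theorem pvFirstSplit_none (u : List Char) (h : ',' ∉ u) : pvFirstSplit [' ', ','] u = none := by
  induction u with
  | nil => rfl
  | cons c rest ih =>
    have hp : ([' ', ','].isPrefixOf (c :: rest)) = false := by
      cases rest with
      | nil => simp [List.isPrefixOf]
      | cons d r =>
        have hd : d ≠ ',' := fun he => h (by simp [he])
        simp [List.isPrefixOf]
        exact fun _ h2 => hd h2.symm
    simp [pvFirstSplit, hp, ih (fun hm => h (List.mem_cons_of_mem _ hm))]

theorem pvFirstSplit_at (u t : List Char) (h : ',' ∉ u) :
    pvFirstSplit [' ', ','] (u ++ ' ' :: ',' :: t) = some (u, t) := by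
  induction u with
  | nil => simp [pvFirstSplit, List.isPrefixOf]
  | cons c rest ih =>
    have hp : ([' ', ','].isPrefixOf (c :: (rest ++ ' ' :: ',' :: t))) = false := by
      cases rest with
      | nil => simp [List.isPrefixOf]
      | cons d r =>
        have hd : d ≠ ',' := fun he => h (by simp [he])
        simp [List.isPrefixOf]
        exact fun _ h2 => hd h2.symm
    simp [pvFirstSplit, hp, ih (fun hm => h (List.mem_cons_of_mem _ hm))]

theorem pvJoin_flat (f : List (List Char)) (p : List Char) :
    PySem.Chars.join [',', ' '] (f ++ [p]) = pvFlat f ++ p := by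
  induction f with
  | nil => simp [PySem.Chars.join, pvFlat, List.intercalate]
  | cons q f' ih =>
    have h2 : ∃ r rs, f' ++ [p] = r :: rs := by cases f' <;> simp
    rcases h2 with ⟨r, rs, hr⟩
    rw [List.cons_append, show q :: (f' ++ [p]) = q :: r :: rs from by rw [hr],
      PySem.Chars.join_cons_cons, ← hr, ih]
    simp [pvFlat]

theorem pvRstrip_flat (a e' : List Char) (x : Char) (hx : x ≠ ',' ∧ x ≠ ' ') :
    pvRstripCS (a ++ (e' ++ [x]) ++ [',', ' ']) = a ++ (e' ++ [x]) := by
  unfold pvRstripCS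
  rw [List.reverse_append, List.reverse_append]
  simp only [List.reverse_cons, List.reverse_nil, List.reverse_append, List.nil_append,
    List.cons_append]
  rw [List.dropWhile_cons_of_pos (by decide), List.dropWhile_cons_of_pos (by decide),
    List.dropWhile_cons_of_neg (by simp [hx.1, hx.2])]
  simp

theorem pvFmtB_concat (front : List (List Char)) (e : List Char) (h : front ≠ []) :
    pvFmtB (front ++ [e])
      = PySem.Chars.join [',', ' '] front ++ [' ','a','n','d',' '] ++ e := by
  cases front with
  | nil => exact absurd rfl h
  | cons q rest =>
    have h2 : ∃ r rs, rest ++ [e] = r :: rs := by cases rest <;> simp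
    rcases h2 with ⟨r, rs, hr⟩
    rw [List.cons_append, hr, show pvFmtB (q :: r :: rs)
        = PySem.Chars.join [',', ' '] ((q :: r :: rs).dropLast) ++ [' ','a','n','d',' ']
          ++ ((q :: r :: rs).getLastD []) from rfl,
      ← hr, ← List.cons_append, List.dropLast_concat, List.getLastD_concat]

theorem pvJoin_pair (a b : List Char) :
    PySem.Chars.join [' ','a','n','d',' '] [a, b] = a ++ [' ','a','n','d',' '] ++ b := by
  rw [PySem.Chars.join_cons_cons, PySem.Chars.join_singleton]

theorem pvFmt_eq (es : List (List Char)) (h : ∀ e ∈ es, pvEntryOK e) :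
    PySem.Chars.join [' ','a','n','d',' ']
      (pvRsplit1 (pvRstripCS (pvFlat es)) [',',' ']) = pvFmtB es := by
  rcases List.eq_nil_or_concat es with rfl | ⟨front, e, rfl⟩
  · rfl
  · obtain ⟨hne, hnc, hlast⟩ := h e (by simp)
    rcases List.eq_nil_or_concat e with rfl | ⟨e', x, rfl⟩
    · exact absurd rfl hne
    simp only [List.concat_eq_append] at h hne hnc hlast ⊢
    have hx : x ≠ ' ' ∧ x ≠ ',' := hlast x (by rw [List.getLast?_concat])
    have hnc' : ',' ∉ (e' ++ [x]).reverse := by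
      rw [List.mem_reverse]; exact fun hm => hnc _ hm rfl
    rw [pvFlat_append, pvRstrip_flat _ _ _ ⟨hx.2, hx.1⟩]
    unfold pvRsplit1
    rw [show ([',',' '] : List Char).reverse = [' ',','] from rfl]
    rcases List.eq_nil_or_concat front with rfl | ⟨f', p, rfl⟩
    · rw [show pvFlat ([] : List (List Char)) = [] from rfl, List.nil_append,
        pvFirstSplit_none _ hnc']
      exact PySem.Chars.join_singleton _ _
    · simp only [List.concat_eq_append] at h ⊢
      rw [show pvFlat (f' ++ [p]) ++ (e' ++ [x])
          = (pvFlat f' ++ p) ++ [',',' '] ++ (e' ++ [x]) from by rw [pvFlat_append],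
        show ((pvFlat f' ++ p) ++ [',',' '] ++ (e' ++ [x])).reverse
          = (e' ++ [x]).reverse ++ ' ' :: ',' :: (pvFlat f' ++ p).reverse from by simp,
        pvFirstSplit_at _ _ hnc']
      simp only [List.reverse_reverse]
      rw [pvJoin_pair, pvFmtB_concat _ _ (by simp), pvJoin_flat]

theorem pvSent_eq (row : Int) (rank : List Char) (hch : '.' ∉ rank) :
    pvSentA row rank = pvSentB row rank := by
  unfold pvSentA pvSentB
  rw [show pvRowA row rank 0 [] = pvFlat (pvPieces row rank) from by
      rw [pvRowA_eq_flat row rank hch 0 []]; rfl,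
    pvFmt_eq _ (pvPieces_ok row rank)]

theorem pvJoin_nil_flatten (ps : List (List Char)) : PySem.Chars.join [] ps = ps.flatten := by
  induction ps with
  | nil => rfl
  | cons a rest ih =>
    cases rest with
    | nil => simp [PySem.Chars.join_singleton]
    | cons r rs => rw [PySem.Chars.join_cons_cons, ih]; simp

theorem pvFold_eq (l : List (Int × List Char)) (hch : ∀ p ∈ l, '.' ∉ p.2) :
    ∀ (acc : List (List Char)),
      l.foldl (fun out p => if p.2 = ['8'] then out else out ++ pvSentA p.1 p.2) acc.flatten
        = (l.foldl (fun parts p => if p.2 = ['8'] then parts else parts ++ [pvSentB p.1 p.2])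
            acc).flatten := by
  induction l with
  | nil => intro acc; rfl
  | cons p rest ih =>
    intro acc
    simp only [List.foldl]
    by_cases h8 : p.2 = ['8'] <;> simp only [h8, if_pos, reduceIte]
    · exact ih (fun q hq => hch q (List.mem_cons_of_mem _ hq)) acc
    · rw [show acc.flatten ++ pvSentA p.1 p.2 = (acc ++ [pvSentB p.1 p.2]).flatten from by
          simp [pvSent_eq p.1 p.2 (hch p List.mem_cons_self)]]
      exact ih (fun q hq => hch q (List.mem_cons_of_mem _ hq)) _

-- ===== VERDICT (by name: the statement is the Claim_ definition above) =====
theorem describe_board_spec : Claim_equal_describe_board := by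
  intro fen hdom hpre
  unfold Spec_describe_board describe_board describe_board_alt
  cases fen with
  | nil => exact absurd rfl hpre.1
  | cons f rest =>
    have hall := hpre.2
    rw [show ((f :: rest).headD "") = f from rfl, List.all_eq_true] at hall
    have hch : ∀ p ∈ PySem.List.enumerate (PySem.Chars.splitOn f.toList ['/']), '.' ∉ p.2 := by
      intro p hp hdot
      rcases (PySem.List.mem_enumerate_iff _ _ _).mp hp with ⟨k, hk, rfl⟩
      have hmem : (PySem.Chars.splitOn f.toList ['/'])[k] ∈ PySem.Chars.splitOn f.toList ['/'] :=
        List.getElem_mem hk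
      have := pvSplitOn_mem f.toList ['/'] _ '.' hmem hdot
      exact absurd (hall '.' this) (by decide)
    rw [show PySem.List.pyGet? (f :: rest) 0 = some f from by
        simp [PySem.List.pyGet?, PySem.List.pyIdx?]]
    exact congrArg String.mk
      ((pvFold_eq (PySem.List.enumerate (PySem.Chars.splitOn f.toList ['/'])) hch []).trans
        (pvJoin_nil_flatten _).symm)
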